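-- pv_equiv track=rewrite | github.com/DragunWF/Competitive-Programming | CodeWars/python/6_kyu/n_centered_array.py | is_centered
-- ===== SOURCE A (Python) =====
-- def is_centered(xs: list[int], n: int) -> bool:
--     N = len(xs)
--     for i in range(N):
--         current_sum = 0
--         iterated_once = False
--         for j in range(i, N - i):
--             iterated_once = True
--             current_sum += xs[j]
--         if current_sum == n and (N % 2 == 0 or iterated_once):
--             return True
--     return False
-- ===== SOURCE B (Python) =====
-- def is_centered(xs: list[int], n: int) -> bool:
--     if not xs:
--         return False
--     pref = [0]
--     total = 0
--     for x in xs: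
--         total += x
--         pref.append(total)
--     N = len(xs)
--     return any(pref[N - i] - pref[i] == n for i in range(N // 2 + 1))
-- ===== Notes on version B (the rewrite author's own statement) =====
-- stated objective: faster
-- what changed: B builds a prefix-sum array in one pass and checks each centered slice sum with an O(1) lookup, instead of A's re-summing every slice xs[i:N-i] in a nested loop.
import Mathlib
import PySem

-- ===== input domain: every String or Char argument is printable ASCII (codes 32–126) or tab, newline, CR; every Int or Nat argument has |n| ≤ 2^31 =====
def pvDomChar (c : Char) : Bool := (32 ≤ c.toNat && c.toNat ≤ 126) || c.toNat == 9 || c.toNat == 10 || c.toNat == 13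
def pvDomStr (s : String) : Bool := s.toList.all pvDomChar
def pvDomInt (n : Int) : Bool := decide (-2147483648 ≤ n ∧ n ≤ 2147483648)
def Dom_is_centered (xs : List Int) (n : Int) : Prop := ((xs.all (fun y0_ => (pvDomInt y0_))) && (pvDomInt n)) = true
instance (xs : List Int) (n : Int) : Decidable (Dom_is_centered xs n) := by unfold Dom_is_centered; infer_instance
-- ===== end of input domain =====

-- B replaces A's quadratic re-summation of each centered slice by one prefix-sum pass with an
-- O(1) sum lookup per candidate center (objective: faster, asymptotic).

-- ===== PORT A =====
-- the outer 'for i in range(N)' with early 'return True'; the inner loop is a fold carrying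
-- (current_sum, iterated_once), factored out as condA; xs[j] is always in range, ported as pyGetD xs j 0
def condA (xs : List Int) (n N i : Int) : Bool :=
  let st := (PySem.List.pyRange i (N - i)).foldl
      (fun (p : Int × Bool) j => (p.1 + PySem.List.pyGetD xs j 0, true)) (0, false)
  decide (st.1 = n ∧ (PySem.Int.mod N 2 = 0 ∨ st.2 = true))

def aGo (xs : List Int) (n N : Int) : List Int → Bool
  | [] => false
  | i :: rest => if condA xs n N i then true else aGo xs n N rest

def is_centered (xs : List Int) (n : Int) : Bool :=
  aGo xs n (xs.length : Int) (PySem.List.pyRange 0 (xs.length : Int))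

-- ===== PORT B =====
-- the 'for x in xs' loop building pref (and the running total)
def prefStep (p : List Int × Int) (x : Int) : List Int × Int :=
  (p.1 ++ [p.2 + x], p.2 + x)

def is_centered_alt (xs : List Int) (n : Int) : Bool :=
  if xs = [] then false
  else
    let pref := (xs.foldl prefStep ([0], 0)).1
    let N : Int := xs.length
    (PySem.List.pyRange 0 (PySem.Int.floordiv N 2 + 1)).any
      (fun i => decide (PySem.List.pyGetD pref (N - i) 0 - PySem.List.pyGetD pref i 0 = n))

-- ===== PRECONDITION & SPEC =====
def Spec_is_centered (xs : List Int) (n : Int) (out : Bool) : Prop := out = is_centered_alt xs n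
instance (xs : List Int) (n : Int) (out : Bool) : Decidable (Spec_is_centered xs n out) := by unfold Spec_is_centered; infer_instance

-- ===== CLAIM (what is proved, stated in full; the proofs are below) =====
def Claim_equal_is_centered : Prop := ∀ (xs : List Int) (n : Int), Dom_is_centered xs n → Spec_is_centered xs n (is_centered xs n)

-- ===== LEMMAS AND PROOFS =====

lemma aGo_eq_any (xs : List Int) (n N : Int) (l : List Int) :
    aGo xs n N l = l.any (condA xs n N) := by
  induction l with
  | nil => rfl
  | cons i rest ih =>
    rw [aGo, List.any_cons, ← ih]
    cases h : condA xs n N i <;> simp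

-- prefix sum of the first k elements
def pfx (xs : List Int) (k : Nat) : Int := (xs.take k).sum

lemma foldl_prefStep (xs : List Int) : ∀ (acc : List Int) (t : Int),
    xs.foldl prefStep (acc, t) =
      (acc ++ (List.range xs.length).map (fun k => t + pfx xs (k + 1)), t + xs.sum) := by
  induction xs with
  | nil => intro acc t; simp [pfx]
  | cons x rest ih =>
    intro acc t
    simp only [List.foldl_cons, prefStep, ih, List.length_cons, List.range_succ_eq_map,
      List.map_cons, List.map_map, Prod.mk.injEq]
    refine ⟨?_, by simp [add_assoc]⟩
    rw [List.append_assoc]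
    congr 1
    have hmap : (fun k => t + x + pfx rest (k + 1))
        = ((fun k => t + pfx (x :: rest) (k + 1)) ∘ Nat.succ) := by
      funext k
      simp [pfx, List.take_succ_cons, add_assoc]
    rw [hmap]
    have hhead : t + x = t + pfx (x :: rest) (0 + 1) := by simp [pfx]
    rw [← hhead]
    rfl

lemma pref_getD (xs : List Int) (k : Int) (h0 : 0 ≤ k) (hk : k ≤ (xs.length : Int)) :
    PySem.List.pyGetD (xs.foldl prefStep ([0], 0)).1 k 0 = pfx xs k.toNat := by
  rw [foldl_prefStep xs [0] 0, PySem.List.pyGetD_of_nonneg _ _ h0]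
  have hform : ([0] ++ (List.range xs.length).map (fun k => 0 + pfx xs (k + 1)))
      = (List.range (xs.length + 1)).map (fun k => pfx xs k) := by
    rw [List.range_succ_eq_map, List.map_cons, List.map_map]
    simp [pfx, Function.comp_def]
  rw [hform]
  exact PySem.List.getD_map_range _ _ _ _ (by omega)

lemma foldl_true (l : List Int) (b : Bool) :
    l.foldl (fun (_ : Bool) (_ : Int) => true) b = (b || !l.isEmpty) := by
  induction l generalizing b with
  | nil => simp
  | cons y t ih => simp [ih]

lemma sum_slice (xs : List Int) : ∀ (k : Nat) (a : Int), 0 ≤ a → a + k ≤ (xs.length : Int) →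
    ((PySem.List.pyRange a (a + k)).map (fun j => PySem.List.pyGetD xs j 0)).sum
      = pfx xs (a + k).toNat - pfx xs a.toNat := by
  intro k
  induction k with
  | zero =>
    intro a _ _
    simp [PySem.List.pyRange_one_eq_nil (le_refl a)]
  | succ m ih =>
    intro a h0 hk
    have hle : a ≤ a + (m : Int) := by omega
    have hsplit : (a + ((m : Int) + 1)) = (a + m) + 1 := by ring
    rw [show ((m + 1 : Nat) : Int) = (m : Int) + 1 by push_cast; ring, hsplit,
      PySem.List.pyRange_one_succ_right hle, List.map_append, List.sum_append]
    rw [ih a h0 (by omega)]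
    have hidx : (a + (m : Int)).toNat < xs.length := by omega
    have hget : PySem.List.pyGetD xs (a + (m : Int)) 0 = xs[(a + (m : Int)).toNat] := by
      rw [PySem.List.pyGetD_of_nonneg _ _ (by omega)]
      exact List.getD_eq_getElem _ _ hidx
    have hsucc : pfx xs ((a + (m : Int)).toNat + 1)
        = pfx xs (a + (m : Int)).toNat + xs[(a + (m : Int)).toNat] := by
      simpa [pfx] using List.sum_take_succ xs (a + (m : Int)).toNat hidx
    have hcast : ((a + (m : Int)) + 1).toNat = (a + (m : Int)).toNat + 1 := by omega
    simp only [List.map_cons, List.map_nil, List.sum_cons, List.sum_nil, hget, hcast, hsucc]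
    ring

-- condA, rewritten arithmetically for 0 ≤ i < N (N = xs.length)
lemma condA_char (xs : List Int) (n i : Int) (h0 : 0 ≤ i) (_hi : i < (xs.length : Int)) :
    condA xs n (xs.length : Int) i
      = decide ((if 2 * i ≤ (xs.length : Int)
            then pfx xs ((xs.length : Int) - i).toNat - pfx xs i.toNat
            else 0) = n
          ∧ ((2 : Int) ∣ (xs.length : Int) ∨ 2 * i < (xs.length : Int))) := by
  unfold condA
  rw [PySem.List.foldl_prod_mk (f := fun acc j => acc + PySem.List.pyGetD xs j 0)
      (g := fun (_ : Bool) (_ : Int) => true)]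
  simp only [PySem.List.foldl_add, PySem.Int.mod_eq_zero_iff_dvd, zero_add, foldl_true,
    Bool.false_or]
  by_cases hc : 2 * i ≤ (xs.length : Int)
  · rw [if_pos hc]
    have hsum : ((PySem.List.pyRange i ((xs.length : Int) - i)).map
        (fun j => PySem.List.pyGetD xs j 0)).sum
        = pfx xs ((xs.length : Int) - i).toNat - pfx xs i.toNat := by
      have hk : ((xs.length : Int) - i) = i + (((xs.length : Int) - 2 * i).toNat : Int) := by
        omega
      rw [hk, sum_slice xs _ i h0 (by omega)]
    rw [hsum]
    by_cases hlt : 2 * i < (xs.length : Int)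
    · have hne : ¬ ((PySem.List.pyRange i ((xs.length : Int) - i)).isEmpty = true) := by
        intro hnil
        rw [List.isEmpty_iff] at hnil
        have hmem : i ∈ PySem.List.pyRange i ((xs.length : Int) - i) :=
          PySem.List.mem_pyRange_one.mpr ⟨le_refl i, by omega⟩
        rw [hnil] at hmem
        exact absurd hmem List.not_mem_nil
      simp [hne, hlt]
    · -- 2i = N: N is even, both empty-slice disjuncts agree
      have heven : (2 : Int) ∣ (xs.length : Int) := ⟨i, by omega⟩
      have hnil : (PySem.List.pyRange i ((xs.length : Int) - i)).isEmpty = true := by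
        rw [List.isEmpty_iff]
        exact PySem.List.pyRange_one_eq_nil (by omega)
      simp [hnil, heven]
  · rw [if_neg hc]
    have hnil : (PySem.List.pyRange i ((xs.length : Int) - i)) = [] :=
      PySem.List.pyRange_one_eq_nil (by omega)
    have hlt : ¬ (2 * i < (xs.length : Int)) := by omega
    simp [hnil, hlt]

-- ===== VERDICT (by name: the statement is the Claim_ definition above) =====
theorem is_centered_spec : Claim_equal_is_centered := by
  intro xs n _
  unfold Spec_is_centered is_centered is_centered_alt
  rw [aGo_eq_any]
  by_cases hnil : xs = []
  · subst hnil; rfl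
  · simp only [if_neg hnil]
    have hN1 : 1 ≤ (xs.length : Int) := by
      have : xs.length ≠ 0 := fun h => hnil (List.eq_nil_of_length_eq_zero h)
      omega
    rw [Bool.eq_iff_iff]
    simp only [List.any_eq_true, PySem.List.mem_pyRange_one]
    have hdiv : PySem.Int.floordiv (xs.length : Int) 2 = (xs.length : Int) / 2 :=
      PySem.Int.floordiv_eq_ediv_of_pos (by omega)
    rw [hdiv]
    constructor
    · rintro ⟨i, ⟨h0, hi⟩, hc⟩
      rw [condA_char xs n i h0 hi, decide_eq_true_iff] at hc
      by_cases h2 : 2 * i ≤ (xs.length : Int)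
      · refine ⟨i, ⟨h0, by omega⟩, ?_⟩
        rw [decide_eq_true_iff,
          pref_getD xs ((xs.length : Int) - i) (by omega) (by omega),
          pref_getD xs i h0 (by omega)]
        rw [if_pos h2] at hc
        exact hc.1
      · -- empty-slice hit: N even and n = 0; the middle index N/2 witnesses it in B
        rw [if_neg h2] at hc
        obtain ⟨hn0, hev⟩ := hc
        have heven : (2 : Int) ∣ (xs.length : Int) := by
          rcases hev with h | h
          · exact h
          · omega
        refine ⟨(xs.length : Int) / 2, ⟨by omega, by omega⟩, ?_⟩
        rw [decide_eq_true_iff,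
          pref_getD xs ((xs.length : Int) - (xs.length : Int) / 2) (by omega) (by omega),
          pref_getD xs ((xs.length : Int) / 2) (by omega) (by omega)]
        have hmid : ((xs.length : Int) - (xs.length : Int) / 2).toNat
            = ((xs.length : Int) / 2).toNat := by omega
        rw [hmid]
        omega
    · rintro ⟨i, ⟨h0, hi⟩, hc⟩
      have h2 : 2 * i ≤ (xs.length : Int) := by omega
      have hiN : i < (xs.length : Int) := by omega
      refine ⟨i, ⟨h0, hiN⟩, ?_⟩
      rw [condA_char xs n i h0 hiN, decide_eq_true_iff, if_pos h2]
      rw [decide_eq_true_iff,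
        pref_getD xs ((xs.length : Int) - i) (by omega) (by omega),
        pref_getD xs i h0 (by omega)] at hc
      refine ⟨hc, ?_⟩
      by_cases hlt : 2 * i < (xs.length : Int)
      · exact Or.inr hlt
      · exact Or.inl ⟨i, by omega⟩
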